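-- pv_equiv track=rewrite | github.com/Kabashi01/adaptive-auth-residual-risk | scenario.py | abac_tier_decision
-- ===== SOURCE A (Python) =====
-- from typing import Dict, Any, List, Optional, Tuple
-- from typing import Dict
-- from typing import Optional, Dict, Any
--
-- def abac_tier_decision(ctx: Dict[str, Any],
--                        must_ops: List[str],
--                        nice_ops: List[str],
--                        optional_ops: List[str],
--                        sid: int):
--     """Return (tier, score, ops_onoff_dict)."""
--
--     def b01(x):
--         if isinstance(x, bool): return 1 if x else 0
--         if isinstance(x, (int, float)): return 1 if x > 0 else 0
--         return 0
--
--     if sid == 4:  # ICS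
--         unknown_loc = b01(ctx.get("Location"))
--         unfamiliar = b01(ctx.get("UnfamiliarDevice"))
--         vpn_off    = 1 - b01(ctx.get("VpnAccess"))       # risk if VPN not used
--         offwin     = b01(ctx.get("OffMainWindow"))
--         PoorLighting      = b01(ctx.get("PoorLighting"))
--
--         # If Location is 0/1 where 1=unknown 0=known
--
--         score = unknown_loc + unfamiliar + vpn_off + offwin + PoorLighting
--     elif sid == 1:  # Healthcare
--     # Assuming Location=1 means unknown, Location=0 means known/trusted
--         unknown_loc = b01(ctx.get("Location"))
--         insec   = b01(ctx.get("UnsecuredWiFi"))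
--         PoorLighting   = b01(ctx.get("PoorLighting"))
--
--         score = unknown_loc + insec + PoorLighting
--     elif sid == 2:  # Healthcare
--     # Assuming Location=1 means unknown, Location=0 means known/trusted
--         unknown_loc = b01(ctx.get("Location"))
--         unusual = b01(ctx.get("UnusualTime"))
--         insec   = b01(ctx.get("InsecNetwork"))
--         PoorLighting   = b01(ctx.get("PoorLighting"))
--
--         score = unknown_loc + unusual + insec + PoorLighting
--     elif sid == 3:  # Healthcare
--     # Assuming Location=1 means unknown, Location=0 means known/trusted
--         unknown_loc = b01(ctx.get("Location"))
--         unusual = b01(ctx.get("UnusualTime"))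
--         insec   = b01(ctx.get("UnsecuredWiFi"))
--         UnknownDevice   = b01(ctx.get("UnknownDevice"))
--         PoorLighting   = b01(ctx.get("PoorLighting"))
--
--         score = unknown_loc + unusual + insec + PoorLighting + UnknownDevice
--     elif sid == 5:  # ICS
--     # Assuming Location=1 means unknown, Location=0 means known/trusted
--         Emergency = b01(ctx.get("Emergency"))
--         SharedDevice = b01(ctx.get("SharedDevice"))
--         OffSite   = b01(ctx.get("OffSite"))
--         PoorLighting   = b01(ctx.get("PoorLighting"))
--
--         score = Emergency + SharedDevice + OffSite + PoorLighting
--     elif sid == 6:  # ICS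
--     # Assuming Location=1 means unknown, Location=0 means known/trusted
--         unknown_loc = b01(ctx.get("Location"))
--         InsecNetwork   = b01(ctx.get("InsecNetwork"))
--         PoorLighting   = b01(ctx.get("PoorLighting"))
--
--         score = unknown_loc + InsecNetwork + PoorLighting
--     else:
--         score = 0
--
--     if score <= 0:
--         tier = "LOW"
--     elif score <= 0:
--         tier = "MEDIUM"
--     else:
--         tier = "HIGH"
--
--     ops = {op: 0 for op in (must_ops + nice_ops + optional_ops)}
--     for op in must_ops:
--         ops[op] = 1
--
--     if tier == "LOW":
--         for op in nice_ops: ops[op] = 1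
--         for op in optional_ops: ops[op] = 1
--     elif tier == "MEDIUM":
--         for op in nice_ops: ops[op] = 1
--         for op in optional_ops: ops[op] = 0
--     else:  # HIGH
--         for op in nice_ops: ops[op] = 0
--         for op in optional_ops: ops[op] = 0
--
--     return tier, score, ops
-- ===== SOURCE B (Python) =====
-- _POSITIVE = {
--     1: frozenset(("Location", "UnsecuredWiFi", "PoorLighting")),
--     2: frozenset(("Location", "UnusualTime", "InsecNetwork", "PoorLighting")),
--     3: frozenset(("Location", "UnusualTime", "UnsecuredWiFi", "PoorLighting", "UnknownDevice")),
--     4: frozenset(("Location", "UnfamiliarDevice", "OffMainWindow", "PoorLighting")),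
--     5: frozenset(("Emergency", "SharedDevice", "OffSite", "PoorLighting")),
--     6: frozenset(("Location", "InsecNetwork", "PoorLighting")),
-- }
-- _NEGATED = {4: frozenset(("VpnAccess",))}  # keys whose PRESENCE removes risk
--
--
-- def abac_tier_decision(ctx, must_ops, nice_ops, optional_ops, sid):
--     """Return (tier, score, ops_onoff_dict) — single scan of ctx instead of per-key lookups."""
--     pos = _POSITIVE.get(sid, frozenset())
--     neg = _NEGATED.get(sid, frozenset())
--     # every negated signal contributes full risk until the scan finds it switched on
--     score = len(neg)
--     for key, value in ctx.items():
--         if isinstance(value, (int, float)) and value > 0: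
--             if key in pos:
--                 score += 1
--             elif key in neg:
--                 score -= 1
--     tier = "LOW" if score <= 0 else "HIGH"
--     order = list(dict.fromkeys(must_ops + nice_ops + optional_ops))
--     if tier == "LOW":
--         ops = dict.fromkeys(order, 1)
--     else:
--         off = set(nice_ops).union(optional_ops)
--         ops = {op: 0 if op in off else 1 for op in order}
--     return tier, score, ops
-- ===== Notes on version B (the rewrite author's own statement) =====
-- stated objective: alternative
-- what changed: B replaces A's per-sid unrolled ctx.get lookups with one single pass over the context items that classifies each key against per-sid positive/negated key sets (negated keys start at full risk and are decremented when seen on), drops the unreachable MEDIUM branch, and builds the ops dict directly per tier (constant 1s on LOW, a downgrade-set test on HIGH) instead of A's init pass plus three overwrite loops.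
import Mathlib
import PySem

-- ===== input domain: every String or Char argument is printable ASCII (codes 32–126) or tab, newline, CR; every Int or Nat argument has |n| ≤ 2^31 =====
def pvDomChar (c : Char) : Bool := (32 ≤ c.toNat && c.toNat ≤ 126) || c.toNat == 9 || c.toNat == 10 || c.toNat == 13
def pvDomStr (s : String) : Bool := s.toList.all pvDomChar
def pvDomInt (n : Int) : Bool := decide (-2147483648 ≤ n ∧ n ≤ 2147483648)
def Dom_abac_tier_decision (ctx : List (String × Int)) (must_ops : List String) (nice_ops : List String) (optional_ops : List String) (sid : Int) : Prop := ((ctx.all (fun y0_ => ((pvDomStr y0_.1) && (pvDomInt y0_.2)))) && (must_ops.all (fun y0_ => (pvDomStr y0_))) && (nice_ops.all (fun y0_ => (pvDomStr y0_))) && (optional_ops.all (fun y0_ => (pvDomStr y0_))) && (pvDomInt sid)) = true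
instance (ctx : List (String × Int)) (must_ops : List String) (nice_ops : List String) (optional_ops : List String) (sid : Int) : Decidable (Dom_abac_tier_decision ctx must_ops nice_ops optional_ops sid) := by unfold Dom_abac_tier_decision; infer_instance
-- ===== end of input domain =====

-- B scans the context once, classifying each key against per-sid positive/negated key sets,
-- instead of A's per-sid unrolled ctx.get lookups; ops are built per-tier in one pass (objective: alternative).

-- ===== PORT A =====
-- b01: with Int context values, the bool branch is subsumed by `v > 0`
def pvB01 (x : Option Int) : Int :=
  match x with
  | some v => if v > 0 then 1 else 0
  | none => 0

def abac_tier_decision (ctx : List (String × Int)) (must_ops : List String) (nice_ops : List String) (optional_ops : List String) (sid : Int) : String × Int × (List (String × Int)) :=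
  let d : PySem.Dict String Int := PySem.Dict.mk ctx
  let score : Int :=
    if sid = 4 then
      let unknown_loc := pvB01 (d.get? "Location")
      let unfamiliar := pvB01 (d.get? "UnfamiliarDevice")
      let vpn_off := 1 - pvB01 (d.get? "VpnAccess")
      let offwin := pvB01 (d.get? "OffMainWindow")
      let poorLighting := pvB01 (d.get? "PoorLighting")
      unknown_loc + unfamiliar + vpn_off + offwin + poorLighting
    else if sid = 1 then
      let unknown_loc := pvB01 (d.get? "Location")
      let insec := pvB01 (d.get? "UnsecuredWiFi")
      let poorLighting := pvB01 (d.get? "PoorLighting")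
      unknown_loc + insec + poorLighting
    else if sid = 2 then
      let unknown_loc := pvB01 (d.get? "Location")
      let unusual := pvB01 (d.get? "UnusualTime")
      let insec := pvB01 (d.get? "InsecNetwork")
      let poorLighting := pvB01 (d.get? "PoorLighting")
      unknown_loc + unusual + insec + poorLighting
    else if sid = 3 then
      let unknown_loc := pvB01 (d.get? "Location")
      let unusual := pvB01 (d.get? "UnusualTime")
      let insec := pvB01 (d.get? "UnsecuredWiFi")
      let unknownDevice := pvB01 (d.get? "UnknownDevice")
      let poorLighting := pvB01 (d.get? "PoorLighting")
      unknown_loc + unusual + insec + poorLighting + unknownDevice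
    else if sid = 5 then
      let emergency := pvB01 (d.get? "Emergency")
      let sharedDevice := pvB01 (d.get? "SharedDevice")
      let offSite := pvB01 (d.get? "OffSite")
      let poorLighting := pvB01 (d.get? "PoorLighting")
      emergency + sharedDevice + offSite + poorLighting
    else if sid = 6 then
      let unknown_loc := pvB01 (d.get? "Location")
      let insecNetwork := pvB01 (d.get? "InsecNetwork")
      let poorLighting := pvB01 (d.get? "PoorLighting")
      unknown_loc + insecNetwork + poorLighting
    else 0
  let tier : String := if score ≤ 0 then "LOW" else if score ≤ 0 then "MEDIUM" else "HIGH"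
  let ops0 : PySem.Dict String Int :=
    (must_ops ++ nice_ops ++ optional_ops).foldl (fun d op => d.insert op 0) PySem.Dict.empty
  let ops1 : PySem.Dict String Int := must_ops.foldl (fun d op => d.insert op 1) ops0
  let ops2 : PySem.Dict String Int :=
    if tier = "LOW" then
      optional_ops.foldl (fun d op => d.insert op 1) (nice_ops.foldl (fun d op => d.insert op 1) ops1)
    else if tier = "MEDIUM" then
      optional_ops.foldl (fun d op => d.insert op 0) (nice_ops.foldl (fun d op => d.insert op 1) ops1)
    else
      optional_ops.foldl (fun d op => d.insert op 0) (nice_ops.foldl (fun d op => d.insert op 0) ops1)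
  (tier, score, ops2.items)

-- ===== PORT B =====
-- per-sid key sets: keys counted as risk when on, and keys whose presence REMOVES risk
def pvPos (sid : Int) : List String :=
  if sid = 1 then ["Location", "UnsecuredWiFi", "PoorLighting"]
  else if sid = 2 then ["Location", "UnusualTime", "InsecNetwork", "PoorLighting"]
  else if sid = 3 then ["Location", "UnusualTime", "UnsecuredWiFi", "PoorLighting", "UnknownDevice"]
  else if sid = 4 then ["Location", "UnfamiliarDevice", "OffMainWindow", "PoorLighting"]
  else if sid = 5 then ["Emergency", "SharedDevice", "OffSite", "PoorLighting"]
  else if sid = 6 then ["Location", "InsecNetwork", "PoorLighting"]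
  else []

def pvNeg (sid : Int) : List String :=
  if sid = 4 then ["VpnAccess"] else []

-- `for key, value in ctx.items()` visits each dict key once; on the assoc-list representation
-- (first match wins) this is exactly a scan that skips keys already seen
def pvScan (pos neg : List String) : List (String × Int) → List String → Int → Int
  | [], _, score => score
  | (k, v) :: rest, seen, score =>
    if k ∈ seen then pvScan pos neg rest seen score
    else pvScan pos neg rest (k :: seen)
      (if 0 < v then (if k ∈ pos then score + 1 else if k ∈ neg then score - 1 else score) else score)

def abac_tier_decision_alt (ctx : List (String × Int)) (must_ops : List String) (nice_ops : List String) (optional_ops : List String) (sid : Int) : String × Int × (List (String × Int)) :=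
  let pos := pvPos sid
  let neg := pvNeg sid
  let score : Int := pvScan pos neg ctx [] (neg.length : Int)
  let tier : String := if score ≤ 0 then "LOW" else "HIGH"
  let order := PySem.List.dedup (must_ops ++ nice_ops ++ optional_ops)
  let ops : List (String × Int) :=
    if score ≤ 0 then order.map (fun op => (op, (1 : Int)))
    else
      let off : PySem.Set String := PySem.Set.union (PySem.Set.ofList nice_ops) optional_ops
      order.map (fun op => (op, if off.contains op then (0 : Int) else 1))
  (tier, score, ops)

-- ===== PRECONDITION & SPEC =====
def Spec_abac_tier_decision (ctx : List (String × Int)) (must_ops : List String) (nice_ops : List String) (optional_ops : List String) (sid : Int) (out : String × Int × (List (String × Int))) : Prop := out = abac_tier_decision_alt ctx must_ops nice_ops optional_ops sid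
instance (ctx : List (String × Int)) (must_ops : List String) (nice_ops : List String) (optional_ops : List String) (sid : Int) (out : String × Int × (List (String × Int))) : Decidable (Spec_abac_tier_decision ctx must_ops nice_ops optional_ops sid out) := by unfold Spec_abac_tier_decision; infer_instance

-- ===== CLAIM (what is proved, stated in full; the proofs are below) =====
def Claim_equal_abac_tier_decision : Prop := ∀ (ctx : List (String × Int)) (must_ops : List String) (nice_ops : List String) (optional_ops : List String) (sid : Int), Dom_abac_tier_decision ctx must_ops nice_ops optional_ops sid → Spec_abac_tier_decision ctx must_ops nice_ops optional_ops sid (abac_tier_decision ctx must_ops nice_ops optional_ops sid)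

-- ===== LEMMAS AND PROOFS =====

-- the lookup-side view of B's scan: sum of signals over a key list, keys already seen masked out
def pvSumSig (ks : List String) (ctx : List (String × Int)) (seen : List String) : Int :=
  (ks.map (fun k => if k ∈ seen then 0 else pvB01 ((PySem.Dict.mk ctx).get? k))).sum

lemma sumSig_nil (ks : List String) (seen : List String) :
    pvSumSig ks [] seen = 0 := by
  unfold pvSumSig
  induction ks with
  | nil => simp
  | cons a t ih =>
    simp only [List.map_cons, List.sum_cons, ih]
    have : (PySem.Dict.mk ([] : List (String × Int))).get? a = none := rfl
    simp [this, pvB01]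

lemma sumSig_cons_seen (ks : List String) (a : String) (v : Int) (rest : List (String × Int))
    (seen : List String) (ha : a ∈ seen) :
    pvSumSig ks ((a, v) :: rest) seen = pvSumSig ks rest seen := by
  unfold pvSumSig
  refine congrArg List.sum (List.map_congr_left ?_)
  intro k _
  by_cases hk : k ∈ seen
  · simp [hk]
  · have hne : a ≠ k := fun h => hk (h ▸ ha)
    simp [hk, PySem.Dict.get?_mk_cons, hne]

lemma sumSig_cons_new (ks : List String) (a : String) (v : Int) (rest : List (String × Int))
    (seen : List String) (ha : a ∉ seen) :
    pvSumSig ks ((a, v) :: rest) seen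
      = pvSumSig ks rest (a :: seen) + (ks.count a : Int) * pvB01 (some v) := by
  induction ks with
  | nil => simp [pvSumSig]
  | cons b t ih =>
    unfold pvSumSig at ih ⊢
    simp only [List.map_cons, List.sum_cons, List.count_cons]
    by_cases hb : b = a
    · subst hb
      have : (PySem.Dict.mk ((b, v) :: rest)).get? b = some v := by
        simp [PySem.Dict.get?_mk_cons]
      simp only [ha, if_false, this, List.mem_cons, true_or, if_true, ih, BEq.rfl]
      push_cast
      ring
    · have hget : (PySem.Dict.mk ((a, v) :: rest)).get? b = (PySem.Dict.mk rest).get? b := by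
        have : (a == b) = false := by simpa using Ne.symm hb
        simp [PySem.Dict.get?_mk_cons, this]
      have hmem : (b ∈ a :: seen) = (b ∈ seen) := by simp [hb]
      simp only [hget, hmem, beq_iff_eq, hb, if_false, ih]
      push_cast
      ring

-- B's scan equals the lookup-side sums (pos/neg nodup and disjoint)
lemma scan_eq_sum (pos neg : List String) (hp : pos.Nodup) (hn : neg.Nodup)
    (hd : ∀ k, k ∈ pos → k ∉ neg) :
    ∀ (ctx : List (String × Int)) (seen : List String) (acc : Int),
    pvScan pos neg ctx seen acc = acc + pvSumSig pos ctx seen - pvSumSig neg ctx seen := by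
  intro ctx
  induction ctx with
  | nil => intro seen acc; simp [pvScan, sumSig_nil]
  | cons p rest ih =>
    intro seen acc
    obtain ⟨a, v⟩ := p
    by_cases ha : a ∈ seen
    · simp only [pvScan, ha, if_true, ih, sumSig_cons_seen _ _ _ _ _ ha]
    · have hcp : (pos.count a : Int) = if a ∈ pos then 1 else 0 := by
        by_cases h : a ∈ pos
        · simp [h, List.count_eq_one_of_mem hp h]
        · simp [h, List.count_eq_zero_of_not_mem h]
      have hcn : (neg.count a : Int) = if a ∈ neg then 1 else 0 := by
        by_cases h : a ∈ neg
        · simp [h, List.count_eq_one_of_mem hn h]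
        · simp [h, List.count_eq_zero_of_not_mem h]
      simp only [pvScan, ha, if_false, ih, sumSig_cons_new _ _ _ _ _ ha, hcp, hcn]
      by_cases h1 : a ∈ pos
      · have h2 : a ∉ neg := hd a h1
        by_cases hv : 0 < v <;> simp [h1, h2, pvB01, hv]
        ring
      · by_cases h2 : a ∈ neg
        · by_cases hv : 0 < v <;> simp [h1, h2, pvB01, hv]
          ring
        · by_cases hv : 0 < v <;> simp [h1, h2, pvB01, hv]

-- with nothing seen yet, the masked sum is just the sum of signals
lemma sumSig_empty_seen (ks : List String) (ctx : List (String × Int)) :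
    pvSumSig ks ctx [] = (ks.map (fun k => pvB01 ((PySem.Dict.mk ctx).get? k))).sum := by
  unfold pvSumSig
  simp

-- A's per-sid score branch equals B's single scan of the context
lemma score_eq (ctx : List (String × Int)) (sid : Int) :
    (let d := PySem.Dict.mk ctx
     if sid = 4 then
      pvB01 (d.get? "Location") + pvB01 (d.get? "UnfamiliarDevice") + (1 - pvB01 (d.get? "VpnAccess")) + pvB01 (d.get? "OffMainWindow") + pvB01 (d.get? "PoorLighting")
    else if sid = 1 then
      pvB01 (d.get? "Location") + pvB01 (d.get? "UnsecuredWiFi") + pvB01 (d.get? "PoorLighting")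
    else if sid = 2 then
      pvB01 (d.get? "Location") + pvB01 (d.get? "UnusualTime") + pvB01 (d.get? "InsecNetwork") + pvB01 (d.get? "PoorLighting")
    else if sid = 3 then
      pvB01 (d.get? "Location") + pvB01 (d.get? "UnusualTime") + pvB01 (d.get? "UnsecuredWiFi") + pvB01 (d.get? "PoorLighting") + pvB01 (d.get? "UnknownDevice")
    else if sid = 5 then
      pvB01 (d.get? "Emergency") + pvB01 (d.get? "SharedDevice") + pvB01 (d.get? "OffSite") + pvB01 (d.get? "PoorLighting")
    else if sid = 6 then
      pvB01 (d.get? "Location") + pvB01 (d.get? "InsecNetwork") + pvB01 (d.get? "PoorLighting")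
    else 0)
    = pvScan (pvPos sid) (pvNeg sid) ctx [] ((pvNeg sid).length : Int) := by
  have key : ∀ s : Int, pvScan (pvPos s) (pvNeg s) ctx [] ((pvNeg s).length : Int)
      = ((pvNeg s).length : Int)
        + ((pvPos s).map (fun k => pvB01 ((PySem.Dict.mk ctx).get? k))).sum
        - ((pvNeg s).map (fun k => pvB01 ((PySem.Dict.mk ctx).get? k))).sum := by
    intro s
    rw [scan_eq_sum (pvPos s) (pvNeg s) ?_ ?_ ?_, sumSig_empty_seen, sumSig_empty_seen]
    · unfold pvPos
      split_ifs <;> decide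
    · unfold pvNeg
      split_ifs <;> decide
    · unfold pvPos pvNeg
      split_ifs <;> intro k hk hk2 <;>
        simp only [List.mem_cons, List.not_mem_nil, or_false] at hk hk2 <;>
        subst hk2 <;> revert hk <;> decide
  rw [key]
  rcases eq_or_ne sid 1 with h|h1
  · subst h; simp [pvPos, pvNeg]; ring
  rcases eq_or_ne sid 2 with h|h2
  · subst h; simp [pvPos, pvNeg]; ring
  rcases eq_or_ne sid 3 with h|h3
  · subst h; simp [pvPos, pvNeg]; ring
  rcases eq_or_ne sid 4 with h|h4
  · subst h; simp [pvPos, pvNeg]; ring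
  rcases eq_or_ne sid 5 with h|h5
  · subst h; simp [pvPos, pvNeg]; ring
  rcases eq_or_ne sid 6 with h|h6
  · subst h; simp [pvPos, pvNeg]; ring
  simp [pvPos, pvNeg, h1, h2, h3, h4, h5, h6]

-- looking up after a constant-value insert loop
lemma getD_foldl_insert_const (l : List String) (d : PySem.Dict String Int) (v : Int) (k : String) :
    (l.foldl (fun d op => d.insert op v) d).getD k 0 = if k ∈ l then v else d.getD k 0 := by
  induction l generalizing d with
  | nil => simp
  | cons a l ih =>
    simp only [List.foldl_cons, ih, List.mem_cons, PySem.Dict.getD_insert]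
    by_cases h1 : k ∈ l <;> by_cases h2 : k = a <;> simp [h1, h2]

-- updating a set with elements it already has leaves it unchanged
lemma set_update_subset (l s : List String) (h : ∀ x ∈ l, x ∈ s) : PySem.Set.update s l = s := by
  induction l generalizing s with
  | nil => rfl
  | cons a l ih =>
    have ha : a ∈ s := h a (by simp)
    have hadd : PySem.Set.add s a = s := by
      simp [PySem.Set.add, PySem.Set.contains, ha]
    simp only [PySem.Set.update, List.foldl_cons, hadd]
    exact ih s (fun x hx => h x (by simp [hx]))

-- A's four insert loops produce exactly the dict "last write wins", keyed by the deduped op list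
lemma ops_items_gen (must nice opt : List String) (a b c : Int) :
    (opt.foldl (fun d op => d.insert op c)
      (nice.foldl (fun d op => d.insert op b)
        (must.foldl (fun d op => d.insert op a)
          ((must ++ nice ++ opt).foldl (fun d op => d.insert op 0) (PySem.Dict.empty))))).items
    = (PySem.List.dedup (must ++ nice ++ opt)).map
        (fun op => (op, if op ∈ opt then c else if op ∈ nice then b else a)) := by
  have hnd : (opt.foldl (fun d op => d.insert op c)
      (nice.foldl (fun d op => d.insert op b)
        (must.foldl (fun d op => d.insert op a)
          ((must ++ nice ++ opt).foldl (fun d op => d.insert op 0) (PySem.Dict.empty))))).keys.Nodup := by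
    apply PySem.Dict.nodup_keys_foldl_insert _ (fun _ _ => c)
    apply PySem.Dict.nodup_keys_foldl_insert _ (fun _ _ => b)
    apply PySem.Dict.nodup_keys_foldl_insert _ (fun _ _ => a)
    apply PySem.Dict.nodup_keys_foldl_insert _ (fun _ _ => (0:Int))
    exact PySem.Dict.nodup_keys_empty
  have hkeys : (opt.foldl (fun d op => d.insert op c)
      (nice.foldl (fun d op => d.insert op b)
        (must.foldl (fun d op => d.insert op a)
          ((must ++ nice ++ opt).foldl (fun d op => d.insert op 0) (PySem.Dict.empty))))).keys
      = PySem.List.dedup (must ++ nice ++ opt) := by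
    rw [PySem.Dict.keys_foldl_insert (f := fun _ _ => c),
        PySem.Dict.keys_foldl_insert (f := fun _ _ => b),
        PySem.Dict.keys_foldl_insert (f := fun _ _ => a),
        PySem.Dict.keys_foldl_insert (f := fun _ _ => (0:Int))]
    have h0 : PySem.Set.update (PySem.Dict.empty (κ := String) (ν := Int)).keys (must ++ nice ++ opt)
        = PySem.Set.ofList (must ++ nice ++ opt) := rfl
    rw [h0]
    rw [set_update_subset must _ (fun x hx => by simp [PySem.Set.mem_ofList, hx]),
        set_update_subset nice _ (fun x hx => by simp [PySem.Set.mem_ofList, hx]),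
        set_update_subset opt _ (fun x hx => by simp [PySem.Set.mem_ofList, hx])]
    simp
  rw [PySem.Dict.items_eq_map_keys _ hnd 0, hkeys]
  apply List.map_congr_left
  intro k hk
  have hk2 : k ∈ must ++ nice ++ opt := by simpa [PySem.List.mem_dedup] using hk
  rw [getD_foldl_insert_const, getD_foldl_insert_const, getD_foldl_insert_const, getD_foldl_insert_const]
  simp only [List.mem_append] at hk2
  by_cases ho : k ∈ opt <;> by_cases hn : k ∈ nice <;> by_cases hm : k ∈ must <;>
    simp [ho, hn, hm] at hk2 ⊢

-- ===== VERDICT (by name: the statement is the Claim_ definition above) =====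
theorem abac_tier_decision_spec : Claim_equal_abac_tier_decision := by
  intro ctx must_ops nice_ops optional_ops sid _
  unfold Spec_abac_tier_decision
  simp only [abac_tier_decision, abac_tier_decision_alt]
  rw [score_eq ctx sid]
  set s := pvScan (pvPos sid) (pvNeg sid) ctx [] ((pvNeg sid).length : Int) with hs
  by_cases hle : s ≤ 0
  · simp only [hle, if_pos]
    rw [ops_items_gen]
    simp
  · simp only [hle, if_false]
    rw [if_neg (by decide : ¬("HIGH" : String) = "LOW"),
        if_neg (by decide : ¬("HIGH" : String) = "MEDIUM"), ops_items_gen]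
    refine congrArg _ (congrArg _ ?_)
    apply List.map_congr_left
    intro k _
    by_cases ho : k ∈ optional_ops <;> by_cases hn : k ∈ nice_ops <;>
      simp [PySem.Set.contains, PySem.Set.mem_union, PySem.Set.mem_ofList, ho, hn]
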